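-- pv_equiv track=rewrite | github.com/iklobato/reddit | format_tables.py | parse_additional_info
-- ===== SOURCE A (Python) =====
-- from typing import List, Dict, Any
--
-- def parse_additional_info(additional: str) -> Dict[str, str]:
--     """Parse additional info string into structured fields."""
--     parsed = {
--         'review': '',
--         'branch': '',
--         'changes': '',
--         'labels': '',
--         'comments': '',
--         'priority': '',
--         'estimate': '',
--         'draft_wip': '',
--         'merge': '',
--         'approvals': '',
--         'author': '',
--         'reporter': '',
--         'type_info': '',
--         'assignee': '',
--         'watching': ''
--     }
--
--     if not additional:
--         return parsed
--
--     # Split by pipe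
--     parts = [p.strip() for p in additional.split('|')]
--
--     for part in parts:
--         part_lower = part.lower()
--
--         # Review status
--         if 'review:' in part_lower:
--             parsed['review'] = part.split(':', 1)[1].strip() if ':' in part else part
--         # Branch info
--         elif 'branch:' in part_lower:
--             parsed['branch'] = part.split(':', 1)[1].strip() if ':' in part else part
--         # Changes
--         elif 'changes:' in part_lower or ('+' in part and '-' in part and ('lines' in part_lower or 'files' in part_lower)):
--             parsed['changes'] = part.split(':', 1)[1].strip() if ':' in part else part
--         # Labels
--         elif 'labels:' in part_lower:
--             parsed['labels'] = part.split(':', 1)[1].strip() if ':' in part else part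
--         # Comments
--         elif 'comments:' in part_lower:
--             parsed['comments'] = part.split(':', 1)[1].strip() if ':' in part else part
--         # Priority
--         elif 'priority:' in part_lower:
--             parsed['priority'] = part.split(':', 1)[1].strip() if ':' in part else part
--         # Estimate
--         elif 'estimate:' in part_lower:
--             parsed['estimate'] = part.split(':', 1)[1].strip() if ':' in part else part
--         # Draft/WIP
--         elif part_lower in ['draft', 'wip'] or part_lower.startswith('draft') or part_lower.startswith('wip'):
--             parsed['draft_wip'] = part
--         # Merge status
--         elif 'merge:' in part_lower:
--             parsed['merge'] = part.split(':', 1)[1].strip() if ':' in part else part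
--         # Approvals
--         elif 'approved' in part_lower or 'pending' in part_lower or 'approvals' in part_lower:
--             if 'approvals' in part_lower or 'approved' in part_lower:
--                 parsed['approvals'] = part
--         # Author
--         elif 'author:' in part_lower:
--             parsed['author'] = part.split(':', 1)[1].strip() if ':' in part else part
--         # Reporter
--         elif 'reporter:' in part_lower:
--             parsed['reporter'] = part.split(':', 1)[1].strip() if ':' in part else part
--         # Type info
--         elif 'type:' in part_lower:
--             parsed['type_info'] = part.split(':', 1)[1].strip() if ':' in part else part
--         # Files changed (for MRs)
--         elif 'files:' in part_lower:
--             parsed['changes'] = part.split(':', 1)[1].strip() if ':' in part else part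
--         # Assignee
--         elif 'assignee:' in part_lower:
--             parsed['assignee'] = part.split(':', 1)[1].strip() if ':' in part else part
--         # Watching indicator
--         elif '👁' in part or 'watching' in part_lower:
--             parsed['watching'] = part
--
--     return parsed
-- ===== SOURCE B (Python) =====
-- FIELDS = [
--     'review', 'branch', 'changes', 'labels', 'comments', 'priority',
--     'estimate', 'draft_wip', 'merge', 'approvals', 'author', 'reporter',
--     'type_info', 'assignee', 'watching',
-- ]
--
--
-- def _classify(part):
--     """Map one stripped part to the (field, value) it assigns, or None."""
--     pl = part.lower()
--     colon_value = part.split(':', 1)[1].strip() if ':' in part else part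
--     if 'review:' in pl:
--         return ('review', colon_value)
--     if 'branch:' in pl:
--         return ('branch', colon_value)
--     if 'changes:' in pl or ('+' in part and '-' in part and ('lines' in pl or 'files' in pl)):
--         return ('changes', colon_value)
--     if 'labels:' in pl:
--         return ('labels', colon_value)
--     if 'comments:' in pl:
--         return ('comments', colon_value)
--     if 'priority:' in pl:
--         return ('priority', colon_value)
--     if 'estimate:' in pl:
--         return ('estimate', colon_value)
--     if pl in ('draft', 'wip') or pl.startswith('draft') or pl.startswith('wip'):
--         return ('draft_wip', part)
--     if 'merge:' in pl:
--         return ('merge', colon_value)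
--     if 'approved' in pl or 'pending' in pl or 'approvals' in pl:
--         if 'approvals' in pl or 'approved' in pl:
--             return ('approvals', part)
--         return None  # 'pending' consumes the part but assigns nothing
--     if 'author:' in pl:
--         return ('author', colon_value)
--     if 'reporter:' in pl:
--         return ('reporter', colon_value)
--     if 'type:' in pl:
--         return ('type_info', colon_value)
--     if 'files:' in pl:
--         return ('changes', colon_value)
--     if 'assignee:' in pl:
--         return ('assignee', colon_value)
--     if '👁' in part or 'watching' in pl:
--         return ('watching', part)
--     return None
--
--
-- def parse_additional_info(additional):
--     # Stage 1: classify every part into an optional (field, value) assignment.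
--     parts = [p.strip() for p in additional.split('|')] if additional else []
--     hits = [h for h in map(_classify, parts) if h is not None]
--     # Stage 2: field-major gather — each field takes its LAST assignment.
--     return {f: next((v for g, v in reversed(hits) if g == f), '') for f in FIELDS}
-- ===== Notes on version B (the rewrite author's own statement) =====
-- stated objective: alternative
-- what changed: Replaced A's single forward pass mutating a preset dict via a 15-branch if/elif chain by a two-stage pipeline: classify every part into an optional (field, value) assignment, then build the result field-major, each field taking its last assignment via a reverse search of the hit list (last-write-wins recomputed as first-match-in-reverse, no dict mutation).
import Mathlib
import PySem

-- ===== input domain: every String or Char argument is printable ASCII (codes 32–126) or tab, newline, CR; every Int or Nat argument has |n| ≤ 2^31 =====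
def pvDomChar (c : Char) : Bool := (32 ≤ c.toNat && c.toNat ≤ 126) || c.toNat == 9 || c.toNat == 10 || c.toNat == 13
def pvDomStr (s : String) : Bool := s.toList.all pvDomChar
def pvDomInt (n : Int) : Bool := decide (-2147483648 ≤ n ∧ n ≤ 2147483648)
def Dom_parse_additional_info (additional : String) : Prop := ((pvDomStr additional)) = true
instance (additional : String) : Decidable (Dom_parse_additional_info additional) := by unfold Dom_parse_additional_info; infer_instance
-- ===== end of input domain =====

-- B replaces A's single dict-mutating pass by a two-stage pipeline: classify each part
-- into an optional (field, value) assignment, then gather field-major (last assignment wins,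
-- found by a reverse search). Same results; alternative decomposition, similar cost.

-- part.split(':', 1)[1].strip() if ':' in part else part
-- (the [1] index is guarded by ':' in part, so the getD default is never taken)
def pvColonVal (part : String) : String :=
  if PySem.Str.isIn ":" part then
    PySem.Str.strip (((PySem.Str.splitMax? part ":" 1).getD []).getD 1 "")
  else part

-- ===== PORT A =====
def pvStepA (d : PySem.Dict String String) (part : String) : PySem.Dict String String :=
  let pl := PySem.Str.lower part
  if PySem.Str.isIn "review:" pl then d.insert "review" (pvColonVal part)
  else if PySem.Str.isIn "branch:" pl then d.insert "branch" (pvColonVal part)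
  else if PySem.Str.isIn "changes:" pl || (PySem.Str.isIn "+" part && PySem.Str.isIn "-" part && (PySem.Str.isIn "lines" pl || PySem.Str.isIn "files" pl)) then d.insert "changes" (pvColonVal part)
  else if PySem.Str.isIn "labels:" pl then d.insert "labels" (pvColonVal part)
  else if PySem.Str.isIn "comments:" pl then d.insert "comments" (pvColonVal part)
  else if PySem.Str.isIn "priority:" pl then d.insert "priority" (pvColonVal part)
  else if PySem.Str.isIn "estimate:" pl then d.insert "estimate" (pvColonVal part)
  else if ["draft", "wip"].contains pl || PySem.Str.startswith pl "draft" || PySem.Str.startswith pl "wip" then d.insert "draft_wip" part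
  else if PySem.Str.isIn "merge:" pl then d.insert "merge" (pvColonVal part)
  else if PySem.Str.isIn "approved" pl || PySem.Str.isIn "pending" pl || PySem.Str.isIn "approvals" pl then
    (if PySem.Str.isIn "approvals" pl || PySem.Str.isIn "approved" pl then d.insert "approvals" part else d)
  else if PySem.Str.isIn "author:" pl then d.insert "author" (pvColonVal part)
  else if PySem.Str.isIn "reporter:" pl then d.insert "reporter" (pvColonVal part)
  else if PySem.Str.isIn "type:" pl then d.insert "type_info" (pvColonVal part)
  else if PySem.Str.isIn "files:" pl then d.insert "changes" (pvColonVal part)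
  else if PySem.Str.isIn "assignee:" pl then d.insert "assignee" (pvColonVal part)
  else if PySem.Str.isIn "👁" part || PySem.Str.isIn "watching" pl then d.insert "watching" part
  else d

def parse_additional_info (additional : String) : List (String × String) :=
  let parsed : PySem.Dict String String := PySem.Dict.ofList
    [("review", ""), ("branch", ""), ("changes", ""), ("labels", ""), ("comments", ""),
     ("priority", ""), ("estimate", ""), ("draft_wip", ""), ("merge", ""), ("approvals", ""),
     ("author", ""), ("reporter", ""), ("type_info", ""), ("assignee", ""), ("watching", "")]
  if additional = "" then parsed.items
  else
    let parts := ((PySem.Str.split? additional "|").getD []).map PySem.Str.strip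
    (parts.foldl pvStepA parsed).items

-- ===== PORT B =====
-- _classify: one stripped part ↦ the optional (field, value) assignment it makes
def pvClassify (part : String) : Option (String × String) :=
  let pl := PySem.Str.lower part
  let colonValue := pvColonVal part
  if PySem.Str.isIn "review:" pl then some ("review", colonValue)
  else if PySem.Str.isIn "branch:" pl then some ("branch", colonValue)
  else if PySem.Str.isIn "changes:" pl || (PySem.Str.isIn "+" part && PySem.Str.isIn "-" part && (PySem.Str.isIn "lines" pl || PySem.Str.isIn "files" pl)) then some ("changes", colonValue)
  else if PySem.Str.isIn "labels:" pl then some ("labels", colonValue)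
  else if PySem.Str.isIn "comments:" pl then some ("comments", colonValue)
  else if PySem.Str.isIn "priority:" pl then some ("priority", colonValue)
  else if PySem.Str.isIn "estimate:" pl then some ("estimate", colonValue)
  else if ["draft", "wip"].contains pl || PySem.Str.startswith pl "draft" || PySem.Str.startswith pl "wip" then some ("draft_wip", part)
  else if PySem.Str.isIn "merge:" pl then some ("merge", colonValue)
  else if PySem.Str.isIn "approved" pl || PySem.Str.isIn "pending" pl || PySem.Str.isIn "approvals" pl then
    (if PySem.Str.isIn "approvals" pl || PySem.Str.isIn "approved" pl then some ("approvals", part)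
     else none)  -- 'pending' consumes the part but assigns nothing
  else if PySem.Str.isIn "author:" pl then some ("author", colonValue)
  else if PySem.Str.isIn "reporter:" pl then some ("reporter", colonValue)
  else if PySem.Str.isIn "type:" pl then some ("type_info", colonValue)
  else if PySem.Str.isIn "files:" pl then some ("changes", colonValue)
  else if PySem.Str.isIn "assignee:" pl then some ("assignee", colonValue)
  else if PySem.Str.isIn "👁" part || PySem.Str.isIn "watching" pl then some ("watching", part)
  else none

def pvFields : List String :=
  ["review", "branch", "changes", "labels", "comments", "priority", "estimate",
   "draft_wip", "merge", "approvals", "author", "reporter", "type_info", "assignee", "watching"]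

-- next((v for g, v in reversed(hits) if g == f), '')
def pvLastHit (hits : List (String × String)) (f : String) : String :=
  ((hits.reverse.find? (fun h => h.1 == f)).map (·.2)).getD ""

def parse_additional_info_alt (additional : String) : List (String × String) :=
  let parts := if additional = "" then [] else ((PySem.Str.split? additional "|").getD []).map PySem.Str.strip
  let hits := parts.filterMap pvClassify
  pvFields.map (fun f => (f, pvLastHit hits f))

-- ===== PRECONDITION & SPEC =====
def Spec_parse_additional_info (additional : String) (out : List (String × String)) : Prop := out = parse_additional_info_alt additional
instance (additional : String) (out : List (String × String)) : Decidable (Spec_parse_additional_info additional out) := by unfold Spec_parse_additional_info; infer_instance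

-- ===== CLAIM (what is proved, stated in full; the proofs are below) =====
def Claim_equal_parse_additional_info : Prop := ∀ (additional : String), Dom_parse_additional_info additional → Spec_parse_additional_info additional (parse_additional_info additional)

-- ===== LEMMAS AND PROOFS =====

-- A's branch chain performs exactly the insert that B's classification names (or none).
set_option maxHeartbeats 2000000 in
theorem pvStep_eq_classify (d : PySem.Dict String String) (part : String) :
    pvStepA d part = (pvClassify part).elim d (fun h => d.insert h.1 h.2) := by
  unfold pvStepA pvClassify
  dsimp only
  by_cases h0 : PySem.Str.isIn "review:" (PySem.Str.lower part) = true
  · simp only [if_pos h0]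
    rfl
  · simp only [if_neg h0]
    by_cases h1 : PySem.Str.isIn "branch:" (PySem.Str.lower part) = true
    · simp only [if_pos h1]
      rfl
    · simp only [if_neg h1]
      by_cases h2 : (PySem.Str.isIn "changes:" (PySem.Str.lower part) || PySem.Str.isIn "+" part && PySem.Str.isIn "-" part && (PySem.Str.isIn "lines" (PySem.Str.lower part) || PySem.Str.isIn "files" (PySem.Str.lower part))) = true
      · simp only [if_pos h2]
        rfl
      · simp only [if_neg h2]
        by_cases h3 : PySem.Str.isIn "labels:" (PySem.Str.lower part) = true
        · simp only [if_pos h3]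
          rfl
        · simp only [if_neg h3]
          by_cases h4 : PySem.Str.isIn "comments:" (PySem.Str.lower part) = true
          · simp only [if_pos h4]
            rfl
          · simp only [if_neg h4]
            by_cases h5 : PySem.Str.isIn "priority:" (PySem.Str.lower part) = true
            · simp only [if_pos h5]
              rfl
            · simp only [if_neg h5]
              by_cases h6 : PySem.Str.isIn "estimate:" (PySem.Str.lower part) = true
              · simp only [if_pos h6]
                rfl
              · simp only [if_neg h6]
                by_cases h7 : (["draft", "wip"].contains (PySem.Str.lower part) || PySem.Str.startswith (PySem.Str.lower part) "draft" || PySem.Str.startswith (PySem.Str.lower part) "wip") = true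
                · simp only [if_pos h7]
                  rfl
                · simp only [if_neg h7]
                  by_cases h8 : PySem.Str.isIn "merge:" (PySem.Str.lower part) = true
                  · simp only [if_pos h8]
                    rfl
                  · simp only [if_neg h8]
                    by_cases h9 : (PySem.Str.isIn "approved" (PySem.Str.lower part) || PySem.Str.isIn "pending" (PySem.Str.lower part) || PySem.Str.isIn "approvals" (PySem.Str.lower part)) = true
                    · simp only [if_pos h9]
                      by_cases hi : (PySem.Str.isIn "approvals" (PySem.Str.lower part) || PySem.Str.isIn "approved" (PySem.Str.lower part)) = true
                      · simp only [if_pos hi]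
                        rfl
                      · simp only [if_neg hi]
                        rfl
                    · simp only [if_neg h9]
                      by_cases h10 : PySem.Str.isIn "author:" (PySem.Str.lower part) = true
                      · simp only [if_pos h10]
                        rfl
                      · simp only [if_neg h10]
                        by_cases h11 : PySem.Str.isIn "reporter:" (PySem.Str.lower part) = true
                        · simp only [if_pos h11]
                          rfl
                        · simp only [if_neg h11]
                          by_cases h12 : PySem.Str.isIn "type:" (PySem.Str.lower part) = true
                          · simp only [if_pos h12]
                            rfl
                          · simp only [if_neg h12]
                            by_cases h13 : PySem.Str.isIn "files:" (PySem.Str.lower part) = true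
                            · simp only [if_pos h13]
                              rfl
                            · simp only [if_neg h13]
                              by_cases h14 : PySem.Str.isIn "assignee:" (PySem.Str.lower part) = true
                              · simp only [if_pos h14]
                                rfl
                              · simp only [if_neg h14]
                                by_cases h15 : (PySem.Str.isIn "👁" part || PySem.Str.isIn "watching" (PySem.Str.lower part)) = true
                                · simp only [if_pos h15]
                                  rfl
                                · simp only [if_neg h15]
                                  rfl

-- every field a classification names is one of the preset keys
set_option maxHeartbeats 2000000 in
theorem pvClassify_mem (part : String) (h : String × String) (hc : pvClassify part = some h) :
    h.1 ∈ pvFields := by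
  unfold pvClassify at hc
  dsimp only at hc
  by_cases h0 : PySem.Str.isIn "review:" (PySem.Str.lower part) = true
  · rw [if_pos h0] at hc
    cases hc
    simp [pvFields]
  · rw [if_neg h0] at hc
    by_cases h1 : PySem.Str.isIn "branch:" (PySem.Str.lower part) = true
    · rw [if_pos h1] at hc
      cases hc
      simp [pvFields]
    · rw [if_neg h1] at hc
      by_cases h2 : (PySem.Str.isIn "changes:" (PySem.Str.lower part) || PySem.Str.isIn "+" part && PySem.Str.isIn "-" part && (PySem.Str.isIn "lines" (PySem.Str.lower part) || PySem.Str.isIn "files" (PySem.Str.lower part))) = true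
      · rw [if_pos h2] at hc
        cases hc
        simp [pvFields]
      · rw [if_neg h2] at hc
        by_cases h3 : PySem.Str.isIn "labels:" (PySem.Str.lower part) = true
        · rw [if_pos h3] at hc
          cases hc
          simp [pvFields]
        · rw [if_neg h3] at hc
          by_cases h4 : PySem.Str.isIn "comments:" (PySem.Str.lower part) = true
          · rw [if_pos h4] at hc
            cases hc
            simp [pvFields]
          · rw [if_neg h4] at hc
            by_cases h5 : PySem.Str.isIn "priority:" (PySem.Str.lower part) = true
            · rw [if_pos h5] at hc
              cases hc
              simp [pvFields]
            · rw [if_neg h5] at hc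
              by_cases h6 : PySem.Str.isIn "estimate:" (PySem.Str.lower part) = true
              · rw [if_pos h6] at hc
                cases hc
                simp [pvFields]
              · rw [if_neg h6] at hc
                by_cases h7 : (["draft", "wip"].contains (PySem.Str.lower part) || PySem.Str.startswith (PySem.Str.lower part) "draft" || PySem.Str.startswith (PySem.Str.lower part) "wip") = true
                · rw [if_pos h7] at hc
                  cases hc
                  simp [pvFields]
                · rw [if_neg h7] at hc
                  by_cases h8 : PySem.Str.isIn "merge:" (PySem.Str.lower part) = true
                  · rw [if_pos h8] at hc
                    cases hc
                    simp [pvFields]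
                  · rw [if_neg h8] at hc
                    by_cases h9 : (PySem.Str.isIn "approved" (PySem.Str.lower part) || PySem.Str.isIn "pending" (PySem.Str.lower part) || PySem.Str.isIn "approvals" (PySem.Str.lower part)) = true
                    · rw [if_pos h9] at hc
                      by_cases hi : (PySem.Str.isIn "approvals" (PySem.Str.lower part) || PySem.Str.isIn "approved" (PySem.Str.lower part)) = true
                      · rw [if_pos hi] at hc
                        cases hc
                        simp [pvFields]
                      · rw [if_neg hi] at hc
                        simp at hc
                    · rw [if_neg h9] at hc
                      by_cases h10 : PySem.Str.isIn "author:" (PySem.Str.lower part) = true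
                      · rw [if_pos h10] at hc
                        cases hc
                        simp [pvFields]
                      · rw [if_neg h10] at hc
                        by_cases h11 : PySem.Str.isIn "reporter:" (PySem.Str.lower part) = true
                        · rw [if_pos h11] at hc
                          cases hc
                          simp [pvFields]
                        · rw [if_neg h11] at hc
                          by_cases h12 : PySem.Str.isIn "type:" (PySem.Str.lower part) = true
                          · rw [if_pos h12] at hc
                            cases hc
                            simp [pvFields]
                          · rw [if_neg h12] at hc
                            by_cases h13 : PySem.Str.isIn "files:" (PySem.Str.lower part) = true
                            · rw [if_pos h13] at hc
                              cases hc
                              simp [pvFields]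
                            · rw [if_neg h13] at hc
                              by_cases h14 : PySem.Str.isIn "assignee:" (PySem.Str.lower part) = true
                              · rw [if_pos h14] at hc
                                cases hc
                                simp [pvFields]
                              · rw [if_neg h14] at hc
                                by_cases h15 : (PySem.Str.isIn "👁" part || PySem.Str.isIn "watching" (PySem.Str.lower part)) = true
                                · rw [if_pos h15] at hc
                                  cases hc
                                  simp [pvFields]
                                · rw [if_neg h15] at hc
                                  simp at hc

-- the fallback of a last-hit search with one more (older) hit appended
theorem pvLastHitD_append (hits : List (String × String)) (f f0 v : String) (g : String → String) :
    ((((hits.reverse ++ [(f0, v)]).find? (fun h => h.1 == f)).map (·.2)).getD (g f))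
      = ((((hits.reverse).find? (fun h => h.1 == f)).map (·.2)).getD (if f = f0 then v else g f)) := by
  rw [List.find?_append]
  cases hfind : (hits.reverse).find? (fun h => h.1 == f) with
  | some y => simp
  | none =>
    simp only [Option.none_or, List.find?_singleton]
    by_cases hf : f = f0
    · simp [hf]
    · have : (f0 == f) = false := by simp [Ne.symm hf]
      simp [this, hf]

-- loop invariant: folding A's step over parts, starting from a dict whose items are
-- the preset fields valued by g, yields for each field its last classified assignment
-- (fallback g).
theorem pvFold_items (parts : List String) (g : String → String)
    (d : PySem.Dict String String) (hd : d.items = pvFields.map (fun f => (f, g f))) :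
    (parts.foldl pvStepA d).items
      = pvFields.map (fun f =>
          (f, ((((parts.filterMap pvClassify).reverse.find? (fun h => h.1 == f)).map (·.2)).getD (g f)))) := by
  induction parts generalizing g d with
  | nil => simpa using hd
  | cons p ps ih =>
    simp only [List.foldl_cons, List.filterMap_cons, pvStep_eq_classify]
    cases hc : pvClassify p with
    | none => simpa [hc] using ih g d hd
    | some h =>
      obtain ⟨f0, v⟩ := h
      have hmem : f0 ∈ pvFields := pvClassify_mem p (f0, v) hc
      have hcont : d.contains f0 = true := by
        rw [PySem.Dict.contains_iff_mem_keys]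
        have hkeys : d.keys = pvFields := by
          simp [PySem.Dict.keys, hd, Function.comp_def]
        rw [hkeys]; exact hmem
      have hins : (d.insert f0 v).items
          = pvFields.map (fun f => (f, if f = f0 then v else g f)) := by
        rw [PySem.Dict.items_insert_of_contains d v hcont, hd, List.map_map]
        refine List.map_congr_left (fun f _ => ?_)
        by_cases hf : f = f0 <;> simp [hf]
      simp only [Option.elim_some]
      rw [ih (fun f => if f = f0 then v else g f) (d.insert f0 v) hins]
      refine List.map_congr_left (fun f _ => ?_)
      simp only [List.reverse_cons]
      rw [pvLastHitD_append (ps.filterMap pvClassify) f f0 v g]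

-- ===== VERDICT (by name: the statement is the Claim_ definition above) =====
theorem parse_additional_info_spec : Claim_equal_parse_additional_info := by
  intro additional _
  unfold Spec_parse_additional_info parse_additional_info parse_additional_info_alt
  by_cases h : additional = ""
  · simp only [h, if_true]
    rfl
  · simp only [if_neg h]
    rw [pvFold_items _ (fun _ => "") _ (by rfl)]
    rfl
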